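-- pv_equiv track=rewrite | github.com/wigginno/chesstables | pgn-to-sql-scripts/pgn-to-sql-players.py | elo_to_rating_name
-- ===== SOURCE A (Python) =====
-- def elo_to_rating_name(elo):
-- 	cutoffs = [200, 400, 600, 800, 1000, 1200, 1400, 1600, 1800, 2000, 2200, 2400]
-- 	ratings = ['Class J', 'Class I', 'Class H', 'Class G', 'Class F', 'Class E',\
-- 				 'Class D', 'Class C', 'Class B', 'Class A', 'Expert',\
-- 				 'National Master', 'Senior Master']
--
-- 	for i in range(13):
-- 		if i == 12 or elo < cutoffs[i]:
-- 			break
--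
-- 	return ratings[i]
-- ===== SOURCE B (Python) =====
-- def elo_to_rating_name(elo):
--     names = ('Class J', 'Class I', 'Class H', 'Class G', 'Class F', 'Class E',
--              'Class D', 'Class C', 'Class B', 'Class A', 'Expert',
--              'National Master', 'Senior Master')
--     # cutoffs are exactly 200, 400, ..., 2400, so the class index is
--     # floor(elo/200) clamped to [0, 12]
--     return names[min(12, max(0, elo // 200))]
-- ===== Notes on version B (the rewrite author's own statement) =====
-- stated objective: simpler
-- what changed: Drops the cutoff list and the scanning loop entirely: since the cutoffs are the arithmetic progression 200*i, the class index is computed in closed form as min(12, max(0, elo // 200)).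
import Mathlib
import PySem

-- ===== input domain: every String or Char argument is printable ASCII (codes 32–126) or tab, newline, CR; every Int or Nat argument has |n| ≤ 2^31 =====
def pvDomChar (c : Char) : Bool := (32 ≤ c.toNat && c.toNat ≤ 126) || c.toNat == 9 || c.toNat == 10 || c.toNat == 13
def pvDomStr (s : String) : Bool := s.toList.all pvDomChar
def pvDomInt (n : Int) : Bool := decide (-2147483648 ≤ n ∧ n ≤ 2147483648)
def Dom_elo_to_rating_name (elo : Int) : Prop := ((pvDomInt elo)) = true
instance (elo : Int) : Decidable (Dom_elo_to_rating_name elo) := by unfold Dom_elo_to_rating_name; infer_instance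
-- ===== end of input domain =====

-- B drops A's cutoff list and scanning loop: the cutoffs are the arithmetic progression 200*i,
-- so the class index is the closed form min(12, max(0, elo // 200)); same return value everywhere.

-- ===== PORT A =====
-- for i in range(13): if i == 12 or elo < cutoffs[i]: break      (i carried out of the loop)
def pvLoopA (elo : Int) (cutoffs : List Int) : List Int → Int → Int
  | [], i => i
  | j :: rest, _ => if j == 12 || decide (elo < (PySem.List.pyGet? cutoffs j).getD 0) then j
                    else pvLoopA elo cutoffs rest j

def elo_to_rating_name (elo : Int) : String :=
  let cutoffs : List Int := [200, 400, 600, 800, 1000, 1200, 1400, 1600, 1800, 2000, 2200, 2400]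
  let ratings : List String := ["Class J", "Class I", "Class H", "Class G", "Class F", "Class E",
    "Class D", "Class C", "Class B", "Class A", "Expert", "National Master", "Senior Master"]
  let i := pvLoopA elo cutoffs (PySem.List.pyRange 0 13 1) 0
  (PySem.List.pyGet? ratings i).getD ""

-- ===== PORT B =====
-- return names[min(12, max(0, elo // 200))]
def elo_to_rating_name_alt (elo : Int) : String :=
  let names : List String := ["Class J", "Class I", "Class H", "Class G", "Class F", "Class E",
    "Class D", "Class C", "Class B", "Class A", "Expert", "National Master", "Senior Master"]
  (PySem.List.pyGet? names (min 12 (max 0 (PySem.Int.floordiv elo 200)))).getD ""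

-- ===== PRECONDITION & SPEC =====
def Spec_elo_to_rating_name (elo : Int) (out : String) : Prop := out = elo_to_rating_name_alt elo
instance (elo : Int) (out : String) : Decidable (Spec_elo_to_rating_name elo out) := by unfold Spec_elo_to_rating_name; infer_instance

-- ===== CLAIM =====
def Claim_equal_elo_to_rating_name : Prop := ∀ (elo : Int), Dom_elo_to_rating_name elo → Spec_elo_to_rating_name elo (elo_to_rating_name elo)

-- ===== LEMMAS AND PROOFS =====

def pvC : List Int := [200, 400, 600, 800, 1000, 1200, 1400, 1600, 1800, 2000, 2200, 2400]

-- the common normal form: the index of the first cutoff strictly above elo (12 if none)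
def pvN (elo : Int) : Int :=
  if elo < 200 then 0 else if elo < 400 then 1 else if elo < 600 then 2 else if elo < 800 then 3
  else if elo < 1000 then 4 else if elo < 1200 then 5 else if elo < 1400 then 6 else if elo < 1600 then 7
  else if elo < 1800 then 8 else if elo < 2000 then 9 else if elo < 2200 then 10 else if elo < 2400 then 11
  else 12

set_option maxHeartbeats 1600000 in
theorem pv_hA (elo : Int) :
    pvLoopA elo pvC [0, 1, 2, 3, 4, 5, 6, 7, 8, 9, 10, 11, 12] 0 = pvN elo := by
  have g0 : (PySem.List.pyGet? pvC 0).getD 0 = 200 := by decide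
  have g1 : (PySem.List.pyGet? pvC 1).getD 0 = 400 := by decide
  have g2 : (PySem.List.pyGet? pvC 2).getD 0 = 600 := by decide
  have g3 : (PySem.List.pyGet? pvC 3).getD 0 = 800 := by decide
  have g4 : (PySem.List.pyGet? pvC 4).getD 0 = 1000 := by decide
  have g5 : (PySem.List.pyGet? pvC 5).getD 0 = 1200 := by decide
  have g6 : (PySem.List.pyGet? pvC 6).getD 0 = 1400 := by decide
  have g7 : (PySem.List.pyGet? pvC 7).getD 0 = 1600 := by decide
  have g8 : (PySem.List.pyGet? pvC 8).getD 0 = 1800 := by decide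
  have g9 : (PySem.List.pyGet? pvC 9).getD 0 = 2000 := by decide
  have g10 : (PySem.List.pyGet? pvC 10).getD 0 = 2200 := by decide
  have g11 : (PySem.List.pyGet? pvC 11).getD 0 = 2400 := by decide
  simp only [pvLoopA, g0, g1, g2, g3, g4, g5, g6, g7, g8, g9, g10, g11, pvN,
    show ((0 : Int) == 12) = false by decide, show ((1 : Int) == 12) = false by decide,
    show ((2 : Int) == 12) = false by decide, show ((3 : Int) == 12) = false by decide,
    show ((4 : Int) == 12) = false by decide, show ((5 : Int) == 12) = false by decide,
    show ((6 : Int) == 12) = false by decide, show ((7 : Int) == 12) = false by decide,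
    show ((8 : Int) == 12) = false by decide, show ((9 : Int) == 12) = false by decide,
    show ((10 : Int) == 12) = false by decide, show ((11 : Int) == 12) = false by decide,
    show ((12 : Int) == 12) = true by decide, Bool.false_or, Bool.true_or,
    decide_eq_true_eq, if_true]

set_option maxHeartbeats 1600000 in
theorem pv_hB (elo : Int) : min 12 (max 0 (PySem.Int.floordiv elo 200)) = pvN elo := by
  have h : PySem.Int.floordiv elo 200 * 200 + PySem.Int.mod elo 200 = elo :=
    PySem.Int.floordiv_mul_add_mod elo 200
  have hm0 : 0 ≤ PySem.Int.mod elo 200 := by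
    have := PySem.Int.mod_eq_emod_of_pos (a := elo) (b := 200) (by omega)
    rw [this]; exact Int.emod_nonneg elo (by omega)
  have hm1 : PySem.Int.mod elo 200 < 200 := by
    have := PySem.Int.mod_eq_emod_of_pos (a := elo) (b := 200) (by omega)
    rw [this]; exact Int.emod_lt_of_pos elo (by omega)
  unfold pvN
  split_ifs <;> omega

-- ===== VERDICT =====
theorem elo_to_rating_name_spec : Claim_equal_elo_to_rating_name := by
  intro elo _
  show elo_to_rating_name elo = elo_to_rating_name_alt elo
  have hr : PySem.List.pyRange 0 13 1 = [0, 1, 2, 3, 4, 5, 6, 7, 8, 9, 10, 11, 12] := by decide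
  show (PySem.List.pyGet? _ (pvLoopA elo pvC (PySem.List.pyRange 0 13 1) 0)).getD ""
      = (PySem.List.pyGet? _ (min 12 (max 0 (PySem.Int.floordiv elo 200)))).getD ""
  rw [hr, pv_hA, pv_hB]
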